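-- pv_equiv track=rewrite | github.com/iamdarshg/better-ai | better_ai/data/hf_datasets.py | _clean_code
-- ===== SOURCE A (Python) =====
-- def _clean_code(content: str) -> str:
--     """Clean code content"""
--     # Remove excessive blank lines
--     lines = content.split('\n')
--     cleaned_lines = []
--     blank_count = 0
--
--     for line in lines:
--         stripped = line.strip()
--         if stripped:
--             cleaned_lines.append(line)
--             blank_count = 0
--         elif blank_count < 3:  # Allow up to 3 consecutive blank lines
--             cleaned_lines.append(line)
--             blank_count += 1
--
--     # Limit size
--     cleaned_lines = cleaned_lines[:200]  # Max 200 lines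
--     content = '\n'.join(cleaned_lines)
--
--     # Limit character length
--     if len(content) > 4000:  # Max 4K chars
--         content = content[:4000] + '\n... [truncated]'
--
--     return content
-- ===== SOURCE B (Python) =====
-- def _clean_code(content: str) -> str:
--     """Clean code content (run-based rewrite: group consecutive blank/non-blank lines)."""
--     lines = content.split('\n')
--     cleaned_lines = []
--     i = 0
--     n = len(lines)
--     while i < n:
--         blank = lines[i].strip() == ''
--         j = i + 1
--         while j < n and (lines[j].strip() == '') == blank:
--             j += 1
--         run = lines[i:j]
--         cleaned_lines.extend(run[:3] if blank else run)
--         i = j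
--     cleaned_lines = cleaned_lines[:200]
--     content = '\n'.join(cleaned_lines)
--     if len(content) > 4000:
--         content = content[:4000] + '\n... [truncated]'
--     return content
-- ===== Notes on version B (the rewrite author's own statement) =====
-- stated objective: alternative
-- what changed: Replaces A's line-by-line loop with a blank_count counter by a two-pointer scan that extracts maximal runs of consecutive blank/non-blank lines and keeps a blank run's first 3 lines via a slice; the counter state disappears.
import Mathlib
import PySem

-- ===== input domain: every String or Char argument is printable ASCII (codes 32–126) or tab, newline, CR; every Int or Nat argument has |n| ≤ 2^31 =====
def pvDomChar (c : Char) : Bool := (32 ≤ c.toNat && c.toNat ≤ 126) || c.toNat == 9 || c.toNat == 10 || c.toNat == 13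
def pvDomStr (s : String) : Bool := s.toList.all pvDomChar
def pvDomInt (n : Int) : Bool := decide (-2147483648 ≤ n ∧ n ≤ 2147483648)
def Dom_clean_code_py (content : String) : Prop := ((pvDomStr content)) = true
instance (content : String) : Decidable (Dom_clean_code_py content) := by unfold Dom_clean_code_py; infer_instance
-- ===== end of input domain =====

-- B replaces A's blank_count loop by a two-pointer run extraction (same O(n) cost, different decomposition).

-- ===== PORT A =====
-- the for-loop over lines with the (cleaned_lines, blank_count) state
def pvACleanLoop : List String → Int → List String
  | [], _ => []
  | l :: rest, bc =>
    if PySem.Str.strip l ≠ "" then l :: pvACleanLoop rest 0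
    else if bc < 3 then l :: pvACleanLoop rest (bc + 1)
    else pvACleanLoop rest bc

def clean_code_py (content : String) : String :=
  let lines := (PySem.Str.split? content "\n").getD []   -- sep "\n" ≠ "", so split? is always some
  let cleaned_lines := (pvACleanLoop lines 0).take 200
  let c := PySem.Str.join "\n" cleaned_lines
  if PySem.Str.len c > 4000 then
    PySem.Str.join "" [PySem.Str.slice c none (some 4000), "\n... [truncated]"]
  else c

-- ===== PORT B =====
def pvIsBlank (l : String) : Bool := PySem.Str.strip l == ""

-- the inner while loop: take the maximal prefix whose blankness equals b, return (run-tail, rest)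
def pvTakeRun (b : Bool) : List String → List String × List String
  | [] => ([], [])
  | l :: rest =>
    if pvIsBlank l == b then
      let p := pvTakeRun b rest
      (l :: p.1, p.2)
    else ([], l :: rest)

theorem pvTakeRun_snd_len (b : Bool) : ∀ xs : List String, (pvTakeRun b xs).2.length ≤ xs.length := by
  intro xs
  induction xs with
  | nil => simp [pvTakeRun]
  | cons l rest ih =>
    simp only [pvTakeRun]
    split
    · simpa using Nat.le_succ_of_le ih
    · simp

-- the outer while loop: split the lines into maximal runs, tagged with their blankness
def pvRuns : List String → List (Bool × List String)
  | [] => []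
  | l :: rest =>
    let p := pvTakeRun (pvIsBlank l) rest
    (pvIsBlank l, l :: p.1) :: pvRuns p.2
termination_by xs => xs.length
decreasing_by
  have := pvTakeRun_snd_len (pvIsBlank l) rest
  simpa using Nat.lt_succ_of_le this

def clean_code_py_alt (content : String) : String :=
  let lines := (PySem.Str.split? content "\n").getD []   -- sep "\n" ≠ "", so split? is always some
  let cleaned_lines := ((pvRuns lines).flatMap
      (fun g => if g.1 then g.2.take 3 else g.2)).take 200
  let c := PySem.Str.join "\n" cleaned_lines
  if PySem.Str.len c > 4000 then
    PySem.Str.join "" [PySem.Str.slice c none (some 4000), "\n... [truncated]"]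
  else c

-- ===== PRECONDITION & SPEC =====
def Spec_clean_code_py (content : String) (out : String) : Prop := out = clean_code_py_alt content
instance (content : String) (out : String) : Decidable (Spec_clean_code_py content out) := by unfold Spec_clean_code_py; infer_instance

-- ===== CLAIM (what is proved, stated in full; the proofs are below) =====
def Claim_equal_clean_code_py : Prop := ∀ (content : String), Dom_clean_code_py content → Spec_clean_code_py content (clean_code_py content)

-- ===== LEMMAS AND PROOFS =====

theorem pvTakeRun_append (b : Bool) (xs : List String) :
    (pvTakeRun b xs).1 ++ (pvTakeRun b xs).2 = xs := by
  induction xs with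
  | nil => simp [pvTakeRun]
  | cons l rest ih =>
    simp only [pvTakeRun]
    split
    · simpa using ih
    · simp

theorem pvTakeRun_mem (b : Bool) (xs : List String) :
    ∀ x ∈ (pvTakeRun b xs).1, pvIsBlank x = b := by
  induction xs with
  | nil => simp [pvTakeRun]
  | cons l rest ih =>
    simp only [pvTakeRun]
    split
    · rename_i h
      intro x hx
      simp only [List.mem_cons] at hx
      rcases hx with rfl | hx
      · simpa using h
      · exact ih x hx
    · simp

theorem pvTakeRun_head (b : Bool) (xs : List String) :
    ∀ s, (pvTakeRun b xs).2.head? = some s → pvIsBlank s = !b := by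
  induction xs with
  | nil => simp [pvTakeRun]
  | cons l rest ih =>
    simp only [pvTakeRun]
    split
    · exact ih
    · rename_i hne
      intro s hs
      simp only [List.head?_cons, Option.some.injEq] at hs
      subst hs
      cases hbl : pvIsBlank l <;> cases b <;> simp_all

-- the A-loop does not depend on blank_count when the next line is non-blank (or there is none)
theorem pvACleanLoop_reset (t : List String)
    (ht : ∀ s, t.head? = some s → pvIsBlank s = false) (bc : Int) :
    pvACleanLoop t bc = pvACleanLoop t 0 := by
  cases t with
  | nil => rfl
  | cons h t' =>
    have hh : PySem.Str.strip h ≠ "" := by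
      have := ht h rfl
      simpa [pvIsBlank] using this
    simp [pvACleanLoop, hh]

-- a non-blank run passes through the A-loop unchanged
theorem pvACleanLoop_nonblank (r t : List String)
    (hr : ∀ x ∈ r, pvIsBlank x = false) :
    pvACleanLoop (r ++ t) 0 = r ++ pvACleanLoop t 0 := by
  induction r with
  | nil => simp
  | cons l r' ih =>
    have hl : PySem.Str.strip l ≠ "" := by
      have := hr l (by simp)
      simpa [pvIsBlank] using this
    simp only [List.cons_append, pvACleanLoop]
    rw [if_pos hl, ih (fun x hx => hr x (by simp [hx]))]

-- a blank run keeps exactly its first k lines when the counter starts at 3 - k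
theorem pvACleanLoop_blank (r : List String)
    (hr : ∀ x ∈ r, pvIsBlank x = true) (t : List String)
    (ht : ∀ s, t.head? = some s → pvIsBlank s = false) :
    ∀ k : Nat, k ≤ 3 →
      pvACleanLoop (r ++ t) (3 - (k : Int)) = r.take k ++ pvACleanLoop t 0 := by
  induction r with
  | nil =>
    intro k _
    simpa using pvACleanLoop_reset t ht (3 - (k : Int))
  | cons l r' ih =>
    intro k hk
    have hl : PySem.Str.strip l = "" := by
      have := hr l (by simp)
      simpa [pvIsBlank] using this
    have hr' : ∀ x ∈ r', pvIsBlank x = true := fun x hx => hr x (by simp [hx])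
    cases k with
    | zero =>
      have hnot : ¬ ((3 : Int) - ((0 : Nat) : Int) < 3) := by norm_num
      simp only [List.cons_append, pvACleanLoop, hl, ne_eq, not_true_eq_false, if_false,
        hnot]
      have := ih hr' 0 (by omega)
      simpa using this
    | succ k' =>
      have hlt : (3 : Int) - ((k' + 1 : Nat) : Int) < 3 := by push_cast; omega
      simp only [List.cons_append, pvACleanLoop, hl, ne_eq, not_true_eq_false, if_false,
        hlt, if_pos]
      have harith : (3 : Int) - ((k' + 1 : Nat) : Int) + 1 = 3 - (k' : Int) := by push_cast; omega
      rw [harith, ih hr' k' (by omega)]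
      simp

-- the central equivalence: A's counter loop computes B's run decomposition
theorem pvClean_eq_aux (n : Nat) : ∀ xs : List String, xs.length ≤ n →
    pvACleanLoop xs 0 =
      (pvRuns xs).flatMap (fun g => if g.1 then g.2.take 3 else g.2) := by
  induction n with
  | zero =>
    intro xs h
    have : xs = [] := List.eq_nil_of_length_eq_zero (Nat.le_zero.mp h)
    subst this
    simp [pvRuns, pvACleanLoop]
  | succ n ih =>
    intro xs h
    cases xs with
    | nil => simp [pvRuns, pvACleanLoop]
    | cons l rest =>
      rcases hpe : pvTakeRun (pvIsBlank l) rest with ⟨r, t⟩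
      have happ : r ++ t = rest := by
        have := pvTakeRun_append (pvIsBlank l) rest
        rwa [hpe] at this
      have hmem : ∀ x ∈ r, pvIsBlank x = pvIsBlank l := by
        have := pvTakeRun_mem (pvIsBlank l) rest
        rwa [hpe] at this
      have hhead : ∀ s, t.head? = some s → pvIsBlank s = !(pvIsBlank l) := by
        have := pvTakeRun_head (pvIsBlank l) rest
        rwa [hpe] at this
      have hruns : pvRuns (l :: rest) = (pvIsBlank l, l :: r) :: pvRuns t := by
        rw [pvRuns, hpe]
      have hlen : t.length ≤ n := by
        have h1 : t.length ≤ rest.length := by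
          have := pvTakeRun_snd_len (pvIsBlank l) rest
          rwa [hpe] at this
        have h2 : rest.length ≤ n := by simpa using Nat.lt_succ_iff.mp (Nat.lt_of_lt_of_le (Nat.lt_succ_of_le (le_refl _)) h)
        omega
      have iht := ih t hlen
      rw [hruns, List.flatMap_cons, ← iht, ← happ]
      cases hb : pvIsBlank l with
      | false =>
        have hall : ∀ x ∈ (l :: r), pvIsBlank x = false := by
          intro x hx
          rcases List.mem_cons.mp hx with rfl | hx
          · exact hb
          · rw [hmem x hx]; exact hb
        have := pvACleanLoop_nonblank (l :: r) t hall
        simpa using this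
      | true =>
        have hhead' : ∀ s, t.head? = some s → pvIsBlank s = false := by
          intro s hs; rw [hhead s hs, hb]; rfl
        have hall : ∀ x ∈ (l :: r), pvIsBlank x = true := by
          intro x hx
          rcases List.mem_cons.mp hx with rfl | hx
          · exact hb
          · rw [hmem x hx]; exact hb
        have := pvACleanLoop_blank (l :: r) hall t hhead' 3 (by omega)
        have h30 : (3 : Int) - ((3 : Nat) : Int) = 0 := by norm_num
        rw [h30] at this
        simpa using this

theorem pvClean_eq (xs : List String) :
    pvACleanLoop xs 0 =
      (pvRuns xs).flatMap (fun g => if g.1 then g.2.take 3 else g.2) :=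
  pvClean_eq_aux xs.length xs (le_refl _)

-- ===== VERDICT (by name: the statement is the Claim_ definition above) =====
theorem clean_code_py_spec : Claim_equal_clean_code_py := by
  intro content _
  unfold Spec_clean_code_py clean_code_py clean_code_py_alt
  simp only [pvClean_eq]
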